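-- pv_equiv track=rewrite | github.com/Min-ji99/BOJ | 프로그래머스/lv2/131704. 택배상자/택배상자.py | solution
-- ===== SOURCE A (Python) =====
-- def solution(order):
--     answer = 0
--     stack=[]
--     i=1
--
--     while i!=len(order)+1 :
--         stack.append(i)
--         while stack and stack[-1] == order[answer] :
--             stack.pop()
--             answer+=1
--         i+=1
--     return answer
-- ===== SOURCE B (Python) =====
-- def solution(order):
--     # No explicit stack: since boxes arrive in increasing order, the stack top is always
--     # the largest not-yet-delivered box brought off the belt.  Track `hi` (largest box
--     # taken from the belt), a set `popped` of delivered boxes, and a lazy pointer `top`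
--     # for "largest undelivered box <= hi"; count deliveries until a want is unreachable.
--     n = len(order)
--     popped = set()
--     hi = 0
--     top = 0
--     answer = 0
--     for w in order:
--         if w > hi:
--             if w > n:
--                 break
--             hi = w
--             popped.add(w)
--             top = w - 1
--             answer += 1
--         else:
--             while top >= 1 and top in popped:
--                 top -= 1
--             if top >= 1 and top == w:
--                 popped.add(w)
--                 answer += 1
--             else:
--                 break
--     return answer
-- ===== Notes on version B (the rewrite author's own statement) =====
-- stated objective: alternative
-- what changed: B drops the stack entirely: iterating over the wanted values it tracks only the largest box taken off the belt (hi), a set of delivered boxes and a lazily-decremented pointer to the largest undelivered box (the implicit stack top, since boxes arrive in increasing order), breaking as soon as a want is unreachable.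
import Mathlib
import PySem

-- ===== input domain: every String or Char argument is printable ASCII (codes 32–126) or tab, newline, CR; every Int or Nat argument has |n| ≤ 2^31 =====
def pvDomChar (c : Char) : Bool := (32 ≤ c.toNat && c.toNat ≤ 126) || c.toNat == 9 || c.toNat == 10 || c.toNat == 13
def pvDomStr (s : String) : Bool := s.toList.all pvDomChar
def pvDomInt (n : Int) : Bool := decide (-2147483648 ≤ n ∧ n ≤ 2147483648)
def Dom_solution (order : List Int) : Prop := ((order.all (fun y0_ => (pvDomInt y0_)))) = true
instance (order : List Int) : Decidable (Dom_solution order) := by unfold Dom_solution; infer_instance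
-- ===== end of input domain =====

-- B removes the explicit stack: it walks the wanted values keeping only the largest box
-- taken off the belt, a set of delivered boxes and a lazy pointer to the largest
-- undelivered box (the implicit stack top), breaking early (objective: alternative).

-- ===== PORT A =====
-- The stack is represented head-first (cons = push, head = top = Python stack[-1]).
-- Inner 'while stack and stack[-1] == order[answer]' recurses structurally on the stack;
-- 'order[answer]' is PySem.List.pyGet? (exact; with a nonempty stack the index is always
-- in range in Python, since pops never outrun pushes, so no IndexError arises there).
def popAll (order : List Int) : List Int → Int → List Int × Int
  | [], a => ([], a)
  | t :: rest, a =>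
      if PySem.List.pyGet? order a = some t then popAll order rest (a + 1)
      else (t :: rest, a)

-- outer 'while i != len(order)+1' : fuel counts the remaining iterations (n+1-i)
def loopA (order : List Int) : Nat → Int → List Int → Int → Int
  | 0, _, _, a => a
  | fuel + 1, i, stack, a =>
      let p := popAll order (i :: stack) a
      loopA order fuel (i + 1) p.1 p.2

def solution (order : List Int) : Int :=
  loopA order order.length 1 [] 0

-- ===== PORT B =====
-- 'while top >= 1 and top in popped: top -= 1' : fuel = top.toNat (top drops by 1 each step)
def descend (popped : PySem.Set Int) : Nat → Int → Int
  | 0, top => top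
  | f + 1, top =>
      if 1 ≤ top ∧ popped.contains top then descend popped f (top - 1) else top

-- 'for w in order' with the two early breaks; state = (popped, hi, top, answer)
def loopC (n : Int) : List Int → PySem.Set Int → Int → Int → Int → Int
  | [], _, _, _, ans => ans
  | w :: rest, popped, hi, top, ans =>
      if hi < w then
        if n < w then ans
        else loopC n rest (popped.add w) w (w - 1) (ans + 1)
      else
        let t := descend popped top.toNat top
        if 1 ≤ t ∧ t = w then loopC n rest (popped.add w) hi t (ans + 1)
        else ans

def solution_alt (order : List Int) : Int :=
  loopC (order.length : Int) order PySem.Set.empty 0 0 0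

-- ===== PRECONDITION & SPEC =====
def Spec_solution (order : List Int) (out : Int) : Prop := out = solution_alt order
instance (order : List Int) (out : Int) : Decidable (Spec_solution order out) := by unfold Spec_solution; infer_instance

-- ===== CLAIM =====
def Claim_equal_solution : Prop := ∀ (order : List Int), Dom_solution order → Spec_solution order (solution order)

-- ===== LEMMAS AND PROOFS =====

-- Proof-side intermediate program: A's algorithm re-nested over the wanted values
-- (lazy pushes with a next-box pointer, early break).  A = loopB is proved first,
-- then loopB = loopC via the abstraction mkStack.
def pushLoop (want n : Int) : Nat → List Int → Int → List Int × Int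
  | 0, stack, next => (stack, next)
  | fuel + 1, stack, next =>
      if next ≤ n ∧ stack.head? ≠ some want then
        pushLoop want n fuel (next :: stack) (next + 1)
      else (stack, next)

def loopB (order : List Int) : List Int → Int → List Int → Int → Int
  | [], count, _, _ => count
  | want :: rest, count, stack, next =>
      match pushLoop want (order.length : Int) (((order.length : Int) + 1) - next).toNat stack next with
      | (t :: s, nx) => if t = want then loopB order rest (count + 1) s nx else count
      | ([], _) => count

-- invariant of A's outer loop / loopB's per-want state: the top of the stack is never
-- the currently wanted value (the inner loops have been run to quiescence)
def SInv (order stack : List Int) (a : Int) : Prop :=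
  ∀ t, stack.head? = some t → PySem.List.pyGet? order a ≠ some t

lemma popAll_nonneg (order : List Int) : ∀ (stack : List Int) (a : Int), 0 ≤ a →
    0 ≤ (popAll order stack a).2 := by
  intro stack
  induction stack with
  | nil => intro a ha; simpa [popAll] using ha
  | cons t rest ih =>
      intro a ha
      by_cases h : PySem.List.pyGet? order a = some t
      · simpa [popAll, h] using ih (a + 1) (by omega)
      · simpa [popAll, h] using ha

lemma popAll_inv (order : List Int) : ∀ (stack : List Int) (a : Int),
    SInv order (popAll order stack a).1 (popAll order stack a).2 := by
  intro stack
  induction stack with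
  | nil => intro a t ht; simp [popAll] at ht
  | cons t rest ih =>
      intro a
      by_cases h : PySem.List.pyGet? order a = some t
      · simpa [popAll, h] using ih (a + 1)
      · have hp : popAll order (t :: rest) a = (t :: rest, a) := by simp [popAll, h]
        intro u hu
        rw [hp] at hu ⊢
        simp at hu
        subst hu
        exact h

lemma pushLoop_head_eq (w n : Int) : ∀ (fuel : Nat) (s : List Int) (nx : Int),
    pushLoop w n fuel (w :: s) nx = (w :: s, nx) := by
  intro fuel s nx
  cases fuel with
  | zero => simp [pushLoop]
  | succ f => simp [pushLoop]

lemma drop_cons_of_pyGet? (order : List Int) (a w : Int) (ha : 0 ≤ a)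
    (h : PySem.List.pyGet? order a = some w) :
    order.drop a.toNat = w :: order.drop (a.toNat + 1) := by
  rw [PySem.List.pyGet?_of_nonneg order ha] at h
  rw [List.getElem?_eq_some_iff] at h
  obtain ⟨hlt, hw⟩ := h
  rw [← List.getElem_cons_drop hlt, hw]

lemma drop_nil_of_pyGet?_none (order : List Int) (a : Int) (ha : 0 ≤ a)
    (h : PySem.List.pyGet? order a = none) :
    order.drop a.toNat = [] := by
  rw [PySem.List.pyGet?_of_nonneg order ha] at h
  rw [List.getElem?_eq_none_iff] at h
  exact List.drop_eq_nil_of_le h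

-- loopB absorbs a run of A's pops: zero-push iterations of loopB
lemma loopB_popAll (order : List Int) : ∀ (stack : List Int) (a nx : Int), 0 ≤ a →
    loopB order (order.drop a.toNat) a stack nx
      = loopB order (order.drop (popAll order stack a).2.toNat)
          (popAll order stack a).2 (popAll order stack a).1 nx := by
  intro stack
  induction stack with
  | nil => intro a nx ha; simp [popAll]
  | cons t rest ih =>
      intro a nx ha
      by_cases h : PySem.List.pyGet? order a = some t
      · rw [drop_cons_of_pyGet? order a t ha h]
        have hstep : loopB order (t :: order.drop (a.toNat + 1)) a (t :: rest) nx
            = loopB order (order.drop (a.toNat + 1)) (a + 1) rest nx := by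
          simp [loopB, pushLoop_head_eq]
        rw [hstep]
        have htn : (a + 1).toNat = a.toNat + 1 := by omega
        have := ih (a + 1) nx (by omega)
        rw [htn] at this
        rw [this]
        simp [popAll, h]
      · simp [popAll, h]

-- after the last box, loopB matches nothing more
lemma loopB_stop (order stack : List Int) (a : Int) (ha : 0 ≤ a) (hinv : SInv order stack a) :
    loopB order (order.drop a.toNat) a stack ((order.length : Int) + 1) = a := by
  cases hd : order.drop a.toNat with
  | nil => simp [loopB]
  | cons w rest =>
      have hw : PySem.List.pyGet? order a = some w := by
        rw [PySem.List.pyGet?_of_nonneg order ha]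
        have := @List.getElem?_drop _ order a.toNat 0
        rw [hd] at this
        simpa using this.symm
      have hfuel : (((order.length : Int) + 1) - ((order.length : Int) + 1)).toNat = 0 := by omega
      cases stack with
      | nil => simp [loopB, pushLoop]
      | cons t s =>
          have ht : t ≠ w := by
            intro he; exact hinv t rfl (he ▸ hw)
          simp [loopB, pushLoop, ht]

lemma loopA_none (order : List Int) (a : Int) (h : PySem.List.pyGet? order a = none) :
    ∀ (fuel : Nat) (i : Int) (stack : List Int), loopA order fuel i stack a = a := by
  intro fuel
  induction fuel with
  | zero => intro i stack; simp [loopA]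
  | succ f ih =>
      intro i stack
      have hp : popAll order (i :: stack) a = (i :: stack, a) := by
        simp [popAll, h]
      simp only [loopA, hp]
      exact ih (i + 1) (i :: stack)

lemma AB_lemma (order : List Int) : ∀ (fuel : Nat) (i a : Int) (stack : List Int),
    0 ≤ a → i = (order.length : Int) + 1 - fuel → SInv order stack a →
    loopA order fuel i stack a = loopB order (order.drop a.toNat) a stack i := by
  intro fuel
  induction fuel with
  | zero =>
      intro i a stack ha hi hinv
      simp only [loopA]
      rw [hi]
      simp only [Nat.cast_zero, sub_zero]
      exact (loopB_stop order stack a ha hinv).symm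
  | succ f ih =>
      intro i a stack ha hi hinv
      have hilen : i ≤ (order.length : Int) := by
        have : (0 : Int) ≤ (f : Int) := by positivity
        push_cast at hi; omega
      by_cases hget : PySem.List.pyGet? order a = none
      · rw [loopA_none order a hget, drop_nil_of_pyGet?_none order a ha hget]
        simp [loopB]
      · obtain ⟨w, hw⟩ := Option.ne_none_iff_exists'.mp hget
        rw [drop_cons_of_pyGet? order a w ha hw]
        have hfuel1 : (((order.length : Int) + 1) - i).toNat
            = (((order.length : Int) + 1) - (i + 1)).toNat + 1 := by omega
        have hhead : stack.head? ≠ some w := by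
          intro he; exact hinv w he hw
        by_cases hiw : i = w
        · -- the pushed box is the wanted one: A pops, loopB stops pushing and pops
          have hpush : pushLoop w (order.length : Int)
              ((((order.length : Int) + 1) - i).toNat) stack i = (i :: stack, i + 1) := by
            rw [hfuel1]
            rw [pushLoop]
            rw [if_pos ⟨hilen, hhead⟩]
            rw [hiw, pushLoop_head_eq]
          have hB : loopB order (w :: order.drop (a.toNat + 1)) a stack i
              = loopB order (order.drop (a.toNat + 1)) (a + 1) stack (i + 1) := by
            simp only [loopB, hpush]
            rw [if_pos hiw]
          rw [hB]
          have hpA : popAll order (i :: stack) a = popAll order stack (a + 1) := by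
            rw [popAll, if_pos (by rw [hiw]; exact hw)]
          have htn : (a + 1).toNat = a.toNat + 1 := by omega
          have habs := loopB_popAll order stack (a + 1) (i + 1) (by omega)
          rw [htn] at habs
          rw [habs]
          simp only [loopA, hpA]
          exact ih (i + 1) (popAll order stack (a + 1)).2 (popAll order stack (a + 1)).1
            (popAll_nonneg order stack (a + 1) (by omega))
            (by push_cast at hi ⊢; omega) (popAll_inv order stack (a + 1))
        · -- the pushed box is not wanted: both sides just push it
          have hpA : popAll order (i :: stack) a = (i :: stack, a) := by
            rw [popAll, if_neg (by rw [hw]; intro hc; exact hiw (Option.some.inj hc).symm)]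
          have hstep : loopB order (w :: order.drop (a.toNat + 1)) a stack i
              = loopB order (w :: order.drop (a.toNat + 1)) a (i :: stack) (i + 1) := by
            conv_lhs => rw [loopB]
            conv_rhs => rw [loopB]
            rw [hfuel1, pushLoop, if_pos ⟨hilen, hhead⟩]
          rw [hstep]
          simp only [loopA, hpA]
          have := ih (i + 1) a (i :: stack) ha (by push_cast at hi ⊢; omega)
            (by intro t ht; simp at ht; subst ht; rw [hw]
                intro hc; exact hiw (Option.some.inj hc).symm)
          rw [this, drop_cons_of_pyGet? order a w ha hw]

-- ===== relating loopB to loopC : the abstraction function =====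
-- mkStack popped k = the undelivered boxes among 1..k, largest first (= loopB's stack)
def mkStack (popped : PySem.Set Int) : Nat → List Int
  | 0 => []
  | k + 1 =>
      if ((k : Int) + 1) ∈ popped then mkStack popped k
      else ((k : Int) + 1) :: mkStack popped k

lemma memAdd (s : PySem.Set Int) (x y : Int) :
    y ∈ PySem.Set.add s x ↔ y ∈ s ∨ y = x := by
  unfold PySem.Set.add
  by_cases h : PySem.Set.contains s x = true
  · have hx : x ∈ s := by simpa [PySem.Set.contains] using h
    rw [if_pos h]
    constructor
    · exact Or.inl
    · rintro (hy | rfl)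
      · exact hy
      · exact hx
  · rw [if_neg h]
    simp [List.mem_append]

lemma mkStack_head_bounds (popped : PySem.Set Int) :
    ∀ (k : Nat) (x : Int), (mkStack popped k).head? = some x → 1 ≤ x ∧ x ≤ (k : Int) := by
  intro k
  induction k with
  | zero => intro x hx; simp [mkStack] at hx
  | succ j ih =>
      intro x hx
      by_cases h : ((j : Int) + 1) ∈ popped
      · simp only [mkStack, if_pos h] at hx
        have := ih x hx
        push_cast
        omega
      · simp only [mkStack, if_neg h, List.head?_cons, Option.some.injEq] at hx
        push_cast
        omega

lemma mkStack_head_max (popped : PySem.Set Int) :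
    ∀ (k : Nat) (w : Int) (s : List Int), mkStack popped k = w :: s →
      ∀ x : Int, w < x → x ≤ (k : Int) → x ∈ popped := by
  intro k
  induction k with
  | zero => intro w s h; simp [mkStack] at h
  | succ j ih =>
      intro w s h x hwx hxk
      by_cases hm : ((j : Int) + 1) ∈ popped
      · simp only [mkStack, if_pos hm] at h
        by_cases hx : x = (j : Int) + 1
        · exact hx ▸ hm
        · exact ih w s h x hwx (by push_cast at hxk ⊢; omega)
      · simp only [mkStack, if_neg hm, List.cons.injEq] at h
        exfalso
        push_cast at hxk
        omega

lemma mkStack_add_high (popped : PySem.Set Int) (w : Int) :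
    ∀ (k : Nat), (k : Int) < w → mkStack (PySem.Set.add popped w) k = mkStack popped k := by
  intro k
  induction k with
  | zero => intro _; simp [mkStack]
  | succ j ih =>
      intro hk
      have hmem : ((j : Int) + 1) ∈ PySem.Set.add popped w ↔ ((j : Int) + 1) ∈ popped := by
        rw [memAdd]
        constructor
        · rintro (h | h)
          · exact h
          · exfalso; push_cast at hk; omega
        · exact Or.inl
      have hrest := ih (by push_cast at hk ⊢; omega)
      by_cases h : ((j : Int) + 1) ∈ popped
      · simp only [mkStack, if_pos h, if_pos (hmem.mpr h), hrest]
      · simp only [mkStack, if_neg h, if_neg (fun hc => h (hmem.mp hc)), hrest]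

lemma mkStack_pop_head (popped : PySem.Set Int) (w : Int) :
    ∀ (k : Nat) (s : List Int), mkStack popped k = w :: s →
      mkStack (PySem.Set.add popped w) k = s := by
  intro k
  induction k with
  | zero => intro s h; simp [mkStack] at h
  | succ j ih =>
      intro s h
      by_cases hm : ((j : Int) + 1) ∈ popped
      · simp only [mkStack, if_pos hm] at h
        have hmem : ((j : Int) + 1) ∈ PySem.Set.add popped w := (memAdd _ _ _).mpr (Or.inl hm)
        simp only [mkStack, if_pos hmem]
        exact ih s h
      · simp only [mkStack, if_neg hm, List.cons.injEq] at h
        obtain ⟨hw, hs⟩ := h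
        have hmem : ((j : Int) + 1) ∈ PySem.Set.add popped w :=
          (memAdd _ _ _).mpr (Or.inr hw)
        simp only [mkStack, if_pos hmem]
        rw [← hs]
        exact mkStack_add_high popped w j (by omega)

-- the lazy pointer: descending from k over delivered boxes finds the stack head
lemma descend_eq_headD (popped : PySem.Set Int) :
    ∀ (k : Nat), descend popped k (k : Int) = (mkStack popped k).headD 0 := by
  intro k
  induction k with
  | zero => simp [descend, mkStack]
  | succ j ih =>
      rw [show ((j + 1 : Nat) : Int) = (j : Int) + 1 by push_cast; ring]
      by_cases h : ((j : Int) + 1) ∈ popped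
      · have hc : (PySem.Set.contains popped ((j : Int) + 1)) = true := by
          simp [PySem.Set.contains, h]
        have hstep : descend popped (j + 1) ((j : Int) + 1)
            = descend popped j ((j : Int) + 1 - 1) := by
          rw [descend, if_pos ⟨by push_cast; omega, hc⟩]
        have hsub : ((j : Int) + 1 - 1) = (j : Int) := by ring
        rw [hstep, hsub, ih]
        simp [mkStack, h]
      · have hc : ¬ (PySem.Set.contains popped ((j : Int) + 1)) = true := by
          simp [PySem.Set.contains, h]
        have hstep : descend popped (j + 1) ((j : Int) + 1) = ((j : Int) + 1) := by
          rw [descend, if_neg (by intro hc'; exact hc hc'.2)]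
        rw [hstep]
        simp [mkStack, h]

-- all boxes in (t, h] delivered ⇒ the stack below h equals the stack below t
lemma mkStack_skip (popped : PySem.Set Int) :
    ∀ (h t : Nat), t ≤ h → (∀ x : Int, (t : Int) < x → x ≤ (h : Int) → x ∈ popped) →
      mkStack popped h = mkStack popped t := by
  intro h
  induction h with
  | zero => intro t ht _; interval_cases t; rfl
  | succ j ih =>
      intro t ht hall
      by_cases he : t = j + 1
      · rw [he]
      · have htj : t ≤ j := by omega
        have hm : ((j : Int) + 1) ∈ popped := by
          apply hall <;> push_cast <;> omega
        simp only [mkStack, if_pos hm]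
        exact ih t htj (fun x hx hxj => hall x hx (by push_cast at hxj ⊢; omega))

-- a pushLoop that can never reach the wanted value leaves the head ≠ want
lemma pushLoop_stuck (w n : Int) :
    ∀ (f : Nat) (stack : List Int) (nx : Int), (w < nx ∨ n < w) →
      stack.head? ≠ some w → ((pushLoop w n f stack nx).1).head? ≠ some w := by
  intro f
  induction f with
  | zero => intro stack nx _ hh; simpa [pushLoop] using hh
  | succ g ih =>
      intro stack nx hcase hh
      by_cases hc : nx ≤ n ∧ stack.head? ≠ some w
      · rw [pushLoop, if_pos hc]
        apply ih
        · rcases hcase with h | h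
          · exact Or.inl (by omega)
          · exact Or.inr h
        · simp only [List.head?_cons]
          intro he
          have : nx = w := Option.some.inj he
          rcases hcase with h | h <;> omega
      · rw [pushLoop, if_neg hc]
        exact hh

-- a pushLoop from a stack entirely below w, with hi < w ≤ n, pushes exactly hi+1..w
lemma pushLoop_run (n w : Int) (popped : PySem.Set Int) (hwn : w ≤ n) :
    ∀ (k : Nat) (hi : Nat), (∀ x ∈ popped, x ≤ (hi : Int)) → w - (hi : Int) = (k : Int) + 1 →
      pushLoop w n ((n - (hi : Int)).toNat) (mkStack popped hi) ((hi : Int) + 1)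
        = (mkStack popped w.toNat, w + 1) := by
  intro k
  induction k with
  | zero =>
      intro hi hpop hk
      simp only [Nat.cast_zero, zero_add] at hk
      have hw : w = (hi : Int) + 1 := by omega
      have hfuel : ((n - (hi : Int)).toNat) = ((n - (hi : Int) - 1).toNat) + 1 := by omega
      have hhead : (mkStack popped hi).head? ≠ some w := by
        intro he
        have := mkStack_head_bounds popped hi w he
        omega
      have hmem : w ∉ popped := fun hc => absurd (hpop w hc) (by omega)
      rw [hfuel, pushLoop, if_pos ⟨by omega, hhead⟩, ← hw, pushLoop_head_eq]
      have hsplit : mkStack popped w.toNat = w :: mkStack popped hi := by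
        rw [show w.toNat = hi + 1 by omega]
        simp only [mkStack]
        rw [if_neg (by rw [← hw]; exact hmem), ← hw]
      rw [hsplit]
  | succ g ih =>
      intro hi hpop hk
      have hlt : (hi : Int) + 1 < w := by push_cast at hk; omega
      have hfuel : ((n - (hi : Int)).toNat) = ((n - ((hi : Int) + 1)).toNat) + 1 := by omega
      have hhead : (mkStack popped hi).head? ≠ some w := by
        intro he
        have := mkStack_head_bounds popped hi w he
        omega
      rw [hfuel, pushLoop, if_pos ⟨by omega, hhead⟩]
      have hmem : ((hi : Int) + 1) ∉ popped := fun hc => absurd (hpop _ hc) (by omega)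
      have hstack : ((hi : Int) + 1) :: mkStack popped hi = mkStack popped (hi + 1) := by
        simp [mkStack, hmem]
      rw [hstack]
      have := ih (hi + 1)
        (by intro x hx; push_cast; have := hpop x hx; omega)
        (by push_cast at hk ⊢; omega)
      rwa [show (((hi : Nat) + 1 : Nat) : Int) = (hi : Int) + 1 by push_cast; ring] at this

-- loopB returns the count unchanged when the wanted value is unreachable
lemma loopB_break (order : List Int) (w : Int) (rest : List Int) (ans : Int)
    (stack : List Int) (nx : Int) (hcase : w < nx ∨ (order.length : Int) < w)
    (hh : stack.head? ≠ some w) :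
    loopB order (w :: rest) ans stack nx = ans := by
  have hres := pushLoop_stuck w (order.length : Int)
    ((((order.length : Int) + 1) - nx).toNat) stack nx hcase hh
  rw [loopB]
  rcases hp : pushLoop w (order.length : Int)
      ((((order.length : Int) + 1) - nx).toNat) stack nx with ⟨ps, pn⟩
  cases ps with
  | nil => rfl
  | cons t s =>
      rw [hp] at hres
      simp only [List.head?_cons] at hres
      have : t ≠ w := fun he => hres (by rw [he])
      simp [this]

-- the main simulation: loopB's (stack, next) step-matches loopC's (popped, hi, top)
lemma BC_lemma (order : List Int) : ∀ (rest : List Int) (popped : PySem.Set Int)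
    (hi top ans : Int),
    0 ≤ top → top ≤ hi → hi ≤ (order.length : Int) →
    (∀ x : Int, top < x → x ≤ hi → x ∈ popped) →
    (∀ x ∈ popped, 1 ≤ x ∧ x ≤ hi) →
    loopB order rest ans (mkStack popped hi.toNat) (hi + 1)
      = loopC (order.length : Int) rest popped hi top ans := by
  intro rest
  induction rest with
  | nil => intro popped hi top ans _ _ _ _ _; simp [loopB, loopC]
  | cons w rest ih =>
      intro popped hi top ans htop0 htophi hhin hgap hrange
      have hhi0 : 0 ≤ hi := le_trans htop0 htophi
      -- the lazy pointer finds the head of the abstract stack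
      have hdesc : descend popped top.toNat top = (mkStack popped hi.toNat).headD 0 := by
        have h1 : descend popped top.toNat top
            = (mkStack popped top.toNat).headD 0 := by
          have := descend_eq_headD popped top.toNat
          rwa [Int.toNat_of_nonneg htop0] at this
        have h2 : mkStack popped hi.toNat = mkStack popped top.toNat := by
          apply mkStack_skip popped hi.toNat top.toNat (by omega)
          intro x hx hxk
          exact hgap x (by omega) (by omega)
        rw [h1, h2]
      by_cases hwhi : hi < w
      · by_cases hwn : (order.length : Int) < w
        · -- want beyond the belt: both break
          rw [loopC]
          rw [if_pos hwhi, if_pos hwn]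
          apply loopB_break order w rest ans _ _ (Or.inr hwn)
          intro he
          have := mkStack_head_bounds popped hi.toNat w he
          omega
        · -- want not yet taken off the belt: push hi+1..w, deliver w
          push_neg at hwn
          have hrun := pushLoop_run (order.length : Int) w popped hwn
            (w - hi - 1).toNat hi.toNat
            (by intro x hx; rw [Int.toNat_of_nonneg hhi0]; exact (hrange x hx).2)
            (by rw [Int.toNat_of_nonneg hhi0]; omega)
          rw [Int.toNat_of_nonneg hhi0] at hrun
          have hw1 : 1 ≤ w := by omega
          have hmem : w ∉ popped := fun hc => absurd (hrange w hc).2 (by omega)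
          have hwsplit : mkStack popped w.toNat = w :: mkStack popped (w.toNat - 1) := by
            obtain ⟨m, hm⟩ : ∃ m, w.toNat = m + 1 := ⟨w.toNat - 1, by omega⟩
            have hmw : ((m : Nat) : Int) + 1 = w := by omega
            rw [hm]
            simp only [Nat.add_sub_cancel, mkStack]
            rw [if_neg (by rw [hmw]; exact hmem), hmw]
          have hfuel : (((order.length : Int) + 1) - (hi + 1)).toNat
              = ((order.length : Int) - hi).toNat := by omega
          rw [loopB, hfuel, hrun, hwsplit]
          show (if w = w then loopB order rest (ans + 1)
              (mkStack popped (w.toNat - 1)) (w + 1) else ans)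
            = loopC (order.length : Int) (w :: rest) popped hi top ans
          rw [if_pos rfl, loopC, if_pos hwhi, if_neg (by omega)]
          have hnext : mkStack (PySem.Set.add popped w) w.toNat
              = mkStack popped (w.toNat - 1) := by
            obtain ⟨m, hm⟩ : ∃ m, w.toNat = m + 1 := ⟨w.toNat - 1, by omega⟩
            have hmw : ((m : Nat) : Int) + 1 = w := by omega
            have hmemw : w ∈ PySem.Set.add popped w := (memAdd _ _ _).mpr (Or.inr rfl)
            rw [hm]
            simp only [Nat.add_sub_cancel, mkStack]
            rw [if_pos (by rw [hmw]; exact hmemw)]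
            exact mkStack_add_high popped w m (by omega)
          have := ih (PySem.Set.add popped w) w (w - 1) (ans + 1) (by omega) (by omega) hwn
            (by
              intro x hx hxw
              have hxeq : x = w := by omega
              rw [hxeq]
              exact (memAdd _ _ _).mpr (Or.inr rfl))
            (by
              intro x hx
              rcases (memAdd _ _ _).mp hx with h | h
              · have := hrange x h; omega
              · omega)
          rw [hnext] at this
          exact this
      · -- want already off the belt (or ≤ 0): deliver from the stack, or break
        push_neg at hwhi
        rw [loopC, if_neg (by omega)]
        cases hS : mkStack popped hi.toNat with
        | nil =>
            rw [hS] at hdesc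
            simp only [List.headD_nil] at hdesc
            rw [if_neg (by rw [hdesc]; omega)]
            exact loopB_break order w rest ans [] (hi + 1) (Or.inl (by omega)) (by simp)
        | cons u s =>
            rw [hS] at hdesc
            simp only [List.headD_cons] at hdesc
            by_cases huw : u = w
            · -- head matches: both deliver w
              subst huw
              have hbounds := mkStack_head_bounds popped hi.toNat u (by rw [hS]; rfl)
              have hu1 : 1 ≤ u := hbounds.1
              have huhi : u ≤ hi := by
                have := hbounds.2
                rwa [Int.toNat_of_nonneg hhi0] at this
              rw [if_pos ⟨by omega, hdesc⟩]
              rw [loopB, pushLoop_head_eq]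
              show (if u = u then loopB order rest (ans + 1) s (hi + 1) else ans)
                = loopC (order.length : Int) rest (PySem.Set.add popped u) hi
                    (descend popped top.toNat top) (ans + 1)
              rw [if_pos rfl]
              have hpop : mkStack (PySem.Set.add popped u) hi.toNat = s :=
                mkStack_pop_head popped u hi.toNat s hS
              have := ih (PySem.Set.add popped u) hi (descend popped top.toNat top)
                (ans + 1)
                (by rw [hdesc]; omega)
                (by rw [hdesc]; exact huhi)
                hhin
                (by
                  intro x hx hxhi
                  rw [hdesc] at hx
                  exact (memAdd _ _ _).mpr (Or.inl (mkStack_head_max popped hi.toNat u s hS x hx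
                    (by rw [Int.toNat_of_nonneg hhi0]; omega))))
                (by
                  intro x hx
                  rcases (memAdd _ _ _).mp hx with h | h
                  · exact hrange x h
                  · rw [h]; exact ⟨hu1, huhi⟩)
              rw [hpop] at this
              exact this
            · -- head differs: both break
              rw [if_neg (by rw [hdesc]; exact fun hc => huw hc.2)]
              apply loopB_break order w rest ans (u :: s) (hi + 1) (Or.inl (by omega))
              simp only [List.head?_cons]
              exact fun hc => huw (Option.some.inj hc)

-- ===== VERDICT =====
theorem solution_spec : Claim_equal_solution := by
  intro order _
  unfold Spec_solution solution solution_alt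
  have hAB := AB_lemma order order.length 1 0 [] (by omega)
    (by omega) (by intro t ht; simp at ht)
  have hBC := BC_lemma order order PySem.Set.empty 0 0 0 (by omega) (by omega)
    (by positivity) (by intro x h1 h2; omega)
    (by intro x hx; cases hx)
  simp only [Int.toNat_zero, mkStack, zero_add] at hBC
  simpa using hAB.trans (by simpa using hBC)
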